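-- pv_equiv track=rewrite | github.com/entrymissing/advent-of-code-23 | day14.py | fall_left
-- ===== SOURCE A (Python) =====
-- def fall_left(map):
--   new_map = []
--   for line in map:
--     line = list(line)
--     fall_to = 0
--     for idx, val in enumerate(line):
--       if val == 'O':
--         if fall_to == idx:
--           fall_to += 1
--           continue
--         line[fall_to] = 'O'
--         line[idx] = '.'
--         fall_to += 1
--         continue
--       if val == '#':
--         fall_to = idx + 1
--         continue
--     new_map.append(line)
--   return new_map
-- ===== SOURCE B (Python) =====
-- def _settle(seg):
--     k = seg.count('O')
--     return ['O'] * k + ['.' if c == 'O' else c for c in seg[k:]]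
--
-- def fall_left(map):
--     new_map = []
--     for line in map:
--         out = []
--         seg = []
--         for ch in line:
--             if ch == '#':
--                 out.extend(_settle(seg))
--                 out.append('#')
--                 seg = []
--             else:
--                 seg.append(ch)
--         out.extend(_settle(seg))
--         new_map.append(out)
--     return new_map
-- ===== Notes on version B (the rewrite author's own statement) =====
-- stated objective: alternative
-- what changed: Replaces A's stateful fall-pointer sweep with in-place index writes by a per-'#'-segment decomposition: count the 'O's in each segment, emit that many 'O's, then the remaining chars with 'O' mapped to '.'.
import Mathlib
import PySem

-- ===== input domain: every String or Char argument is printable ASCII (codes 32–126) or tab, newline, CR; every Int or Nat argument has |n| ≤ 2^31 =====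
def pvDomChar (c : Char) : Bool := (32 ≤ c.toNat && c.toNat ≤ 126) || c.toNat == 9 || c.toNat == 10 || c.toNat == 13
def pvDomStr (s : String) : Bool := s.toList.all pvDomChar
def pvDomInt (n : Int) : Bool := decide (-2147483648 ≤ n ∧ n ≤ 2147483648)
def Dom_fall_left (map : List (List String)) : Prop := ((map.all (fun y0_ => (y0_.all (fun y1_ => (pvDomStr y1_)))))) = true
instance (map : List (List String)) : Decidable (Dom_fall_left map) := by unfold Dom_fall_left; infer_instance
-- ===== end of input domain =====

-- B replaces A's stateful fall-pointer sweep (in-place index writes) with a per-'#'-segment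
-- decomposition: count the 'O's of each segment and rebuild it; same cost, different algorithm.

-- ===== PORT A =====
-- the inner enumerate-loop of A: state = (the mutated line, fall_to); reads from the current list, as Python does
def fallLoopA (l : List String) (idx fall_to : Nat) : List String :=
  if _h : idx < l.length then
    let val := l.getD idx ""
    if val = "O" then
      if fall_to = idx then fallLoopA l (idx + 1) (fall_to + 1)
      else fallLoopA ((l.set fall_to "O").set idx ".") (idx + 1) (fall_to + 1)
    else if val = "#" then fallLoopA l (idx + 1) (idx + 1)
    else fallLoopA l (idx + 1) fall_to
  else l
termination_by l.length - idx
decreasing_by all_goals ((try simp only [List.length_set]); omega)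

def fall_left (map : List (List String)) : List (List String) :=
  map.map (fun line => fallLoopA line 0 0)

-- ===== PORT B =====
-- _settle: k copies of 'O', then the leftover chars with 'O' turned into '.'
def settleB (seg : List String) : List String :=
  let k := seg.count "O"
  List.replicate k "O" ++ (seg.drop k).map (fun c => if c = "O" then "." else c)

-- body of B's char loop: flush the buffer at '#', otherwise extend it
def stepB (st : List String × List String) (ch : String) : List String × List String :=
  if ch = "#" then (st.1 ++ settleB st.2 ++ ["#"], []) else (st.1, st.2 ++ [ch])

def fall_left_alt (map : List (List String)) : List (List String) :=
  map.map (fun line =>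
    let st := line.foldl stepB ([], [])
    st.1 ++ settleB st.2)

-- ===== PRECONDITION & SPEC =====
def Spec_fall_left (map : List (List String)) (out : List (List String)) : Prop := out = fall_left_alt map
instance (map : List (List String)) (out : List (List String)) : Decidable (Spec_fall_left map out) := by unfold Spec_fall_left; infer_instance

-- ===== CLAIM (what is proved, stated in full; the proofs are below) =====
def Claim_equal_fall_left : Prop := ∀ (map : List (List String)), Dom_fall_left map → Spec_fall_left map (fall_left map)

-- ===== LEMMAS AND PROOFS =====

theorem settleB_length (p : List String) : (settleB p).length = p.length := by
  have h : p.count "O" ≤ p.length := List.count_le_length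
  simp [settleB]; omega

theorem settleB_nil : settleB [] = [] := by simp [settleB]

theorem count_snoc_O (p : List String) : (p ++ ["O"]).count "O" = p.count "O" + 1 := by simp

theorem count_snoc_other (p : List String) {c : String} (h : c ≠ "O") :
    (p ++ [c]).count "O" = p.count "O" := by
  simp [h]

theorem settleB_snoc_other (p : List String) (c : String) (hO : c ≠ "O") :
    settleB (p ++ [c]) = settleB p ++ [c] := by
  have hk : p.count "O" ≤ p.length := List.count_le_length
  simp [settleB, count_snoc_other p hO, List.drop_append_of_le_length hk, hO]

theorem settleB_snoc_allO (p : List String) (h : p.count "O" = p.length) :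
    settleB (p ++ ["O"]) = settleB p ++ ["O"] := by
  simp [settleB, List.count_append, h, List.replicate_succ']

theorem settleB_snoc_O (p : List String) (h : p.count "O" < p.length) :
    settleB (p ++ ["O"]) = (settleB p).set (p.count "O") "O" ++ ["."] := by
  have h1 : p.count "O" + 1 ≤ p.length := h
  have hd : p.drop (p.count "O") = p[p.count "O"] :: p.drop (p.count "O" + 1) :=
    List.drop_eq_getElem_cons h
  simp only [settleB, count_snoc_O, List.drop_append_of_le_length h1, List.map_append,
    List.map_cons, List.map_nil, List.replicate_succ']
  rw [hd]
  simp
  have hm : List.count "O" p < (List.map (fun c => if c = "O" then "." else c) p).length := by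
    simpa using h
  rw [List.drop_eq_getElem_cons hm]
  simp

theorem foldB_shift (rest : List String) : ∀ (o s : List String),
    rest.foldl stepB (o, s) =
      (o ++ (rest.foldl stepB ([], s)).1, (rest.foldl stepB ([], s)).2) := by
  induction rest with
  | nil => simp
  | cons c rs ih =>
    intro o s
    by_cases hc : c = "#"
    · subst hc
      simp only [List.foldl_cons]
      rw [show stepB (o, s) "#" = (o ++ settleB s ++ ["#"], []) from by simp [stepB],
          show stepB (([] : List String), s) "#" = (settleB s ++ ["#"], []) from by simp [stepB]]
      rw [ih (o ++ settleB s ++ ["#"]) [], ih (settleB s ++ ["#"]) []]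
      simp
    · simp only [List.foldl_cons]
      rw [show stepB (o, s) c = (o, s ++ [c]) from by simp [stepB, hc],
          show stepB (([] : List String), s) c = (([] : List String), s ++ [c]) from by simp [stepB, hc]]
      exact ih o (s ++ [c])

theorem loopA_main : ∀ (rest front p : List String),
    fallLoopA (front ++ settleB p ++ rest) (front.length + p.length) (front.length + p.count "O")
      = front ++ (rest.foldl stepB ([], p)).1 ++ settleB ((rest.foldl stepB ([], p)).2) := by
  intro rest
  induction rest with
  | nil =>
    intro front p
    rw [fallLoopA]
    rw [dif_neg (by
      simp only [List.append_nil, List.length_append, settleB_length]; omega)]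
    simp
  | cons c rs ih =>
    intro front p
    have hkle : p.count "O" ≤ p.length := List.count_le_length
    have hF : (front ++ settleB p).length = front.length + p.length := by
      simp [settleB_length]
    have hL : front ++ settleB p ++ c :: rs = (front ++ settleB p) ++ c :: rs := by
      simp
    have hget : (front ++ settleB p ++ c :: rs).getD (front.length + p.length) "" = c := by
      rw [hL, List.getD_append_right _ _ _ _ hF.le, hF, Nat.sub_self]
      simp
    rw [fallLoopA]
    rw [dif_pos (by
      simp only [List.length_append, List.length_cons, settleB_length]; omega)]
    simp only [hget]
    by_cases hcO : c = "O"
    · subst hcO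
      rw [if_pos rfl]
      by_cases hall : p.count "O" = p.length
      · rw [if_pos (by omega)]
        have e1 : front ++ settleB p ++ "O" :: rs = front ++ settleB (p ++ ["O"]) ++ rs := by
          rw [settleB_snoc_allO p hall]; simp
        rw [e1,
            show front.length + p.length + 1 = front.length + (p ++ ["O"]).length from by
              simp only [List.length_append, List.length_cons, List.length_nil]; omega,
            show front.length + p.count "O" + 1 = front.length + (p ++ ["O"]).count "O" from by
              rw [count_snoc_O]; omega,
            ih front (p ++ ["O"])]
        simp [stepB]
      · rw [if_neg (by omega)]
        have hklt : p.count "O" < p.length := lt_of_le_of_ne hkle hall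
        have s1 : (front ++ settleB p ++ "O" :: rs).set (front.length + p.count "O") "O"
            = front ++ (settleB p).set (p.count "O") "O" ++ "O" :: rs := by
          rw [List.set_append_left _ _ (by rw [hF]; omega)]
          rw [List.set_append_right _ _ (by omega)]
          rw [Nat.add_sub_cancel_left]
        have s2 : (front ++ (settleB p).set (p.count "O") "O" ++ "O" :: rs).set
              (front.length + p.length) "."
            = front ++ (settleB p).set (p.count "O") "O" ++ "." :: rs := by
          rw [List.set_append_right _ _ (by
            simp only [List.length_append, List.length_set, settleB_length]; omega)]
          simp only [List.length_append, List.length_set, settleB_length]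
          simp
        rw [s1, s2]
        have e1 : front ++ (settleB p).set (p.count "O") "O" ++ "." :: rs
            = front ++ settleB (p ++ ["O"]) ++ rs := by
          rw [settleB_snoc_O p hklt]; simp
        rw [e1,
            show front.length + p.length + 1 = front.length + (p ++ ["O"]).length from by
              simp only [List.length_append, List.length_cons, List.length_nil]; omega,
            show front.length + p.count "O" + 1 = front.length + (p ++ ["O"]).count "O" from by
              rw [count_snoc_O]; omega,
            ih front (p ++ ["O"])]
        simp [stepB]
    · rw [if_neg hcO]
      by_cases hcH : c = "#"
      · subst hcH
        rw [if_pos rfl]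
        have e1 : front ++ settleB p ++ "#" :: rs
            = (front ++ settleB p ++ ["#"]) ++ settleB [] ++ rs := by
          simp [settleB_nil]
        have h2 := ih (front ++ settleB p ++ ["#"]) []
        simp only [List.length_nil, List.count_nil, Nat.add_zero] at h2
        rw [e1,
            show front.length + p.length + 1 = (front ++ settleB p ++ ["#"]).length from by
              simp only [List.length_append, List.length_cons, List.length_nil, settleB_length],
            h2]
        rw [show ("#" :: rs).foldl stepB ([], p) = rs.foldl stepB (settleB p ++ ["#"], []) from by
              simp [stepB]]
        rw [foldB_shift rs (settleB p ++ ["#"]) []]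
        simp [List.append_assoc]
      · rw [if_neg hcH]
        have e1 : front ++ settleB p ++ c :: rs = front ++ settleB (p ++ [c]) ++ rs := by
          rw [settleB_snoc_other p c hcO]; simp
        rw [e1,
            show front.length + p.length + 1 = front.length + (p ++ [c]).length from by
              simp only [List.length_append, List.length_cons, List.length_nil]; omega,
            show front.length + p.count "O" = front.length + (p ++ [c]).count "O" from by
              rw [count_snoc_other p hcO],
            ih front (p ++ [c])]
        simp [stepB, hcH]

theorem lineEq (line : List String) :
    fallLoopA line 0 0 =
      (line.foldl stepB ([], [])).1 ++ settleB ((line.foldl stepB ([], [])).2) := by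
  have h := loopA_main line [] []
  simp only [settleB_nil, List.nil_append, List.append_nil, List.length_nil, List.count_nil,
    Nat.add_zero] at h
  exact h

-- ===== VERDICT (by name: the statement is the Claim_ definition above) =====
theorem fall_left_spec : Claim_equal_fall_left := by
  intro map _
  unfold Spec_fall_left fall_left fall_left_alt
  exact List.map_congr_left (fun line _ => lineEq line)
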